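-- pv_equiv track=rewrite | github.com/ShirokoKun/Monovision-project | monovision_v2/language/tier3_api.py | _clean_rich_response
-- ===== SOURCE A (Python) =====
-- def _clean_rich_response(response_text: str) -> str:
--     """Clean up the generated comprehensive response"""
--     # Remove common artifacts
--     response_text = response_text.strip()
--
--     # Ensure proper paragraph structure for long responses
--     if len(response_text) > 200:
--         # Add paragraph breaks for readability
--         sentences = response_text.split('. ')
--         if len(sentences) > 3:
--             # Group sentences into paragraphs
--             paragraphs = []
--             current_paragraph = []
--
--             for i, sentence in enumerate(sentences):
--                 current_paragraph.append(sentence)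
--
--                 # Create paragraph break every 2-3 sentences
--                 if (i + 1) % 3 == 0 and i > 0:
--                     paragraphs.append('. '.join(current_paragraph) + '.')
--                     current_paragraph = []
--
--             # Add remaining sentences
--             if current_paragraph:
--                 paragraphs.append('. '.join(current_paragraph))
--
--             response_text = '\n\n'.join(paragraphs)
--
--     # Ensure proper ending
--     if response_text and not response_text.endswith(('.', '!', '?')):
--         response_text += "."
--
--     return response_text
-- ===== SOURCE B (Python) =====
-- def _fmt(sentences):
--     """Recursively format sentence chunks of 3 into '\\n\\n'-separated paragraphs."""
--     head, rest = sentences[:3], sentences[3:]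
--     para = '. '.join(head) + ('.' if len(head) == 3 else '')
--     return para + ('\n\n' + _fmt(rest) if rest else '')
--
--
-- def _clean_rich_response(response_text: str) -> str:
--     """Clean up the generated comprehensive response"""
--     text = response_text.strip()
--
--     if len(text) > 200:
--         sentences = text.split('. ')
--         if len(sentences) > 3:
--             text = _fmt(sentences)
--
--     if text and not text.endswith(('.', '!', '?')):
--         text += "."
--
--     return text
-- ===== Notes on version B (the rewrite author's own statement) =====
-- stated objective: simpler
-- what changed: Replaced A's per-sentence accumulator loop (current_paragraph state, mod-3 flush, remainder flush, then '\n\n'.join over a paragraphs list) by a recursive helper that takes the first 3 sentences, formats that chunk directly, and recurses on the rest, building the joined string with no paragraphs list.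
import Mathlib
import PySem

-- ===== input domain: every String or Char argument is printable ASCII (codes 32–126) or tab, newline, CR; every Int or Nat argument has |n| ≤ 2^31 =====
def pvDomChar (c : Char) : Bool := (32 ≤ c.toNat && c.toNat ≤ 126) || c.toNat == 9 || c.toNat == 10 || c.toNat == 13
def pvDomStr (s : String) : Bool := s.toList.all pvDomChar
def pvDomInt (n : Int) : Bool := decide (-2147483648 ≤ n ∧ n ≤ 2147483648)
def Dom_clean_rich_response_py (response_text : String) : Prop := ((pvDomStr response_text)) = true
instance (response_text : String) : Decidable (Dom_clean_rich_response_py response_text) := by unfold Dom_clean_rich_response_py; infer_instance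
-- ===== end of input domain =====

-- B replaces A's per-sentence accumulator loop and paragraphs list by a recursive chunk formatter that builds the joined string directly (objective: simpler decomposition, same cost).

-- ===== PORT A =====
-- the body of A's 'for i, sentence in enumerate(sentences)' loop: state = (paragraphs, current_paragraph)
def pyStepA (st : List String × List String) (p : Int × String) : List String × List String :=
  let cur := st.2 ++ [p.2]
  if PySem.Int.mod (p.1 + 1) 3 = 0 ∧ 0 < p.1 then
    (st.1 ++ [PySem.Str.join ". " cur ++ "."], [])
  else
    (st.1, cur)

def clean_rich_response_py (response_text : String) : String :=
  let text := PySem.Str.strip response_text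
  let text :=
    if 200 < PySem.Str.len text then
      let sentences := (PySem.Str.split? text ". ").getD []
      if 3 < PySem.List.len sentences then
        let st := (PySem.List.enumerate sentences 0).foldl pyStepA ([], [])
        let paragraphs := if st.2 ≠ [] then st.1 ++ [PySem.Str.join ". " st.2] else st.1
        PySem.Str.join "\n\n" paragraphs
      else text
    else text
  if text ≠ "" ∧ ¬(PySem.Str.endswith text "." = true ∨ PySem.Str.endswith text "!" = true ∨ PySem.Str.endswith text "?" = true) then
    text ++ "."
  else text

-- ===== PORT B =====
-- B's recursive helper _fmt: format the first 3 sentences, recurse on the rest.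
-- sentences[:3] / sentences[3:] with literal nonnegative bounds are exactly .take 3 / .drop 3.
def pyFmtB (sentences : List String) : String :=
  let head := sentences.take 3
  let rest := sentences.drop 3
  let para := PySem.Str.join ". " head ++ (if head.length = 3 then "." else "")
  para ++ (if _h : rest ≠ [] then "\n\n" ++ pyFmtB rest else "")
termination_by sentences.length
decreasing_by
  simp only [List.length_drop]
  have : sentences.drop 3 ≠ [] := _h
  have h3 : sentences.length - 3 ≠ 0 := by
    intro h0
    exact this (List.drop_eq_nil_of_le (by omega))
  omega

def clean_rich_response_py_alt (response_text : String) : String :=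
  let text := PySem.Str.strip response_text
  let text :=
    if 200 < PySem.Str.len text then
      let sentences := (PySem.Str.split? text ". ").getD []
      if 3 < PySem.List.len sentences then
        pyFmtB sentences
      else text
    else text
  if text ≠ "" ∧ ¬(PySem.Str.endswith text "." = true ∨ PySem.Str.endswith text "!" = true ∨ PySem.Str.endswith text "?" = true) then
    text ++ "."
  else text

-- ===== PRECONDITION & SPEC =====
def Spec_clean_rich_response_py (response_text : String) (out : String) : Prop := out = clean_rich_response_py_alt response_text
instance (response_text : String) (out : String) : Decidable (Spec_clean_rich_response_py response_text out) := by unfold Spec_clean_rich_response_py; infer_instance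

-- ===== CLAIM (what is proved, stated in full; the proofs are below) =====
def Claim_equal_clean_rich_response_py : Prop := ∀ (response_text : String), Dom_clean_rich_response_py response_text → Spec_clean_rich_response_py response_text (clean_rich_response_py response_text)

-- ===== LEMMAS AND PROOFS =====

-- the paragraph both versions build from one chunk of up to 3 sentences
def pvMk (chunk : List String) : String :=
  PySem.Str.join ". " chunk ++ (if chunk.length = 3 then "." else "")

-- the list of paragraphs A's loop produces
def pvChunks3 : List String → List String
  | [] => []
  | x :: xs => pvMk (x :: xs.take 2) :: pvChunks3 (xs.drop 2)
termination_by l => l.length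
decreasing_by simp

theorem pvEnumerate_cons {α : Type} (x : α) (xs : List α) (s : Int) :
    PySem.List.enumerate (x :: xs) s = (s, x) :: PySem.List.enumerate xs (s + 1) := by
  simp [PySem.List.enumerate]

theorem pvMk_three (x b c : String) :
    pvMk [x, b, c] = PySem.Str.join ". " [x, b, c] ++ "." := by
  simp [pvMk]

theorem pvMk_short (chunk : List String) (h : chunk.length ≠ 3) :
    pvMk chunk = PySem.Str.join ". " chunk := by
  simp [pvMk, h]

-- A's accumulator loop (with the final flush) produces exactly the chunk paragraphs
theorem pvLemA (ss : List String) (s : Int) (hs0 : PySem.Int.mod s 3 = 0) (hs : 0 ≤ s)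
    (acc : List String) :
    (if ((PySem.List.enumerate ss s).foldl pyStepA (acc, [])).2 ≠ [] then
       ((PySem.List.enumerate ss s).foldl pyStepA (acc, [])).1
         ++ [PySem.Str.join ". " ((PySem.List.enumerate ss s).foldl pyStepA (acc, [])).2]
     else ((PySem.List.enumerate ss s).foldl pyStepA (acc, [])).1) = acc ++ pvChunks3 ss := by
  rw [show PySem.Int.mod s 3 = s % 3 by simp [PySem.Int.mod, Int.fmod_eq_emod]] at hs0
  induction ss using pvChunks3.induct generalizing s acc with
  | case1 =>
    simp [PySem.List.enumerate, pvChunks3]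
  | case2 x xs ih =>
    have st1 : pyStepA (acc, []) (s, x) = (acc, [x]) := by
      simp [pyStepA, PySem.Int.mod, Int.fmod_eq_emod]
      omega
    match xs with
    | [] =>
      rw [pvEnumerate_cons]
      simp only [List.foldl_cons, st1, List.foldl_nil, PySem.List.enumerate]
      simp [pvChunks3, pvMk_short [x] (by simp)]
    | [b] =>
      have st2 : pyStepA (acc, [x]) (s + 1, b) = (acc, [x, b]) := by
        simp [pyStepA, PySem.Int.mod, Int.fmod_eq_emod]
        omega
      rw [pvEnumerate_cons, pvEnumerate_cons]
      simp only [List.foldl_cons, st1, st2, List.foldl_nil, PySem.List.enumerate]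
      simp [pvChunks3, pvMk_short [x, b] (by simp)]
    | b :: c :: rest =>
      have st2 : pyStepA (acc, [x]) (s + 1, b) = (acc, [x, b]) := by
        simp [pyStepA, PySem.Int.mod, Int.fmod_eq_emod]
        omega
      have st3 : pyStepA (acc, [x, b]) (s + 1 + 1, c)
          = (acc ++ [PySem.Str.join ". " [x, b, c] ++ "."], []) := by
        simp [pyStepA, PySem.Int.mod, Int.fmod_eq_emod]
        omega
      rw [pvEnumerate_cons, pvEnumerate_cons, pvEnumerate_cons]
      simp only [List.foldl_cons, st1, st2, st3]
      simp only [show List.drop 2 (b :: c :: rest) = rest from rfl] at ih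
      rw [ih (s + 1 + 1 + 1) (by omega) (by omega) (acc ++ [PySem.Str.join ". " [x, b, c] ++ "."])]
      simp [pvChunks3, pvMk_three]

theorem pvJoin_cons (p : String) (ps : List String) :
    PySem.Str.join "\n\n" (p :: ps) = p ++ (if ps = [] then "" else "\n\n" ++ PySem.Str.join "\n\n" ps) := by
  cases ps with
  | nil => simp [PySem.Str.join, PySem.Chars.join, List.intercalate]
  | cons q t =>
    have h : ∀ l : List Char, String.ofList ('\n'::'\n'::l) = "\n\n" ++ String.ofList l := by
      intro l
      rw [show ('\n'::'\n'::l) = "\n\n".toList ++ l from rfl, String.ofList_append, String.ofList_toList]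
    simp only [PySem.Str.join, PySem.Chars.join, List.map_cons, List.intercalate,
      List.intersperse, List.flatten, if_neg (by simp : ¬(q :: t = []))]
    simp [List.append_eq, String.ofList_append, h]

theorem pvChunks3_eq_nil (l : List String) : pvChunks3 l = [] ↔ l = [] := by
  cases l <;> simp [pvChunks3]

-- B's recursion equals the joined chunk paragraphs
theorem pvFmtB_eq (ss : List String) :
    pyFmtB ss = PySem.Str.join "\n\n" (pvChunks3 ss) := by
  induction ss using pvChunks3.induct with
  | case1 =>
    simp [pvChunks3, pyFmtB, PySem.Str.join, PySem.Chars.join, List.intercalate]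
  | case2 x xs ih =>
    rw [pyFmtB]
    simp only [List.take_succ_cons, List.drop_succ_cons]
    rw [show pvChunks3 (x :: xs) = pvMk (x :: xs.take 2) :: pvChunks3 (xs.drop 2) from by rw [pvChunks3]]
    rw [pvJoin_cons, ← ih, pvMk]
    by_cases h : xs.drop 2 = []
    · simp [h, PySem.Str.join, PySem.Chars.join, List.intercalate, pvChunks3_eq_nil]
    · simp [h, pvChunks3_eq_nil]

-- ===== VERDICT (by name: the statement is the Claim_ definition above) =====
theorem clean_rich_response_py_spec : Claim_equal_clean_rich_response_py := by
  intro response_text _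
  unfold Spec_clean_rich_response_py clean_rich_response_py clean_rich_response_py_alt
  have hA := pvLemA ((PySem.Str.split? (PySem.Str.strip response_text) ". ").getD []) 0
    (by decide) (le_refl 0) []
  have hB := pvFmtB_eq ((PySem.Str.split? (PySem.Str.strip response_text) ". ").getD [])
  simp only [] at hA ⊢
  rw [hB]
  simp only [List.nil_append] at hA
  rw [hA]
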